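-- pv_equiv track=rewrite | github.com/We-Hack/LeetCode | lxw/num461/num461.py | hammingDistance
-- ===== SOURCE A (Python) =====
-- def hammingDistance(x, y):
--     """
--     # Time: O(1) 32ms. Space: O(1).
--     :type x: int
--     :type y: int
--     :rtype: int
--     """
--     xor = x ^ y
--     distance = 0
--     while xor:
--         if xor & 0x01:
--             distance += 1
--         xor = xor >> 1
--     return distance
-- ===== SOURCE B (Python) =====
-- def hammingDistance(x, y):
--     """Brian Kernighan: clear the lowest set bit once per set bit of x ^ y."""
--     xor = x ^ y
--     distance = 0
--     while xor:
--         xor &= xor - 1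
--         distance += 1
--     return distance
-- ===== Notes on version B (the rewrite author's own statement) =====
-- stated objective: idiomatic
-- what changed: Replaces the per-bit-position shift-and-test loop with Brian Kernighan's trick xor &= xor - 1, iterating once per set bit instead of once per bit position.
import Mathlib
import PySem

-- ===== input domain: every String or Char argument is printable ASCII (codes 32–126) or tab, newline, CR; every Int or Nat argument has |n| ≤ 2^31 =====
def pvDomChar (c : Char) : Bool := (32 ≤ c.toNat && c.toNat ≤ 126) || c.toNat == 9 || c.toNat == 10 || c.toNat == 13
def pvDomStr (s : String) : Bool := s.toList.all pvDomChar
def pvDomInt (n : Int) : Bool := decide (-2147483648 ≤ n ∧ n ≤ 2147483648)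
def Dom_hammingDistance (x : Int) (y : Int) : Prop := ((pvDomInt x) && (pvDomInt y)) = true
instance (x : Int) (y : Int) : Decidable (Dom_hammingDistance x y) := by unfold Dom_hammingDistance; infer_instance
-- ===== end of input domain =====

-- B replaces A's per-bit-position shift-and-test loop with Brian Kernighan's
-- set-bit-clearing loop (xor &= xor - 1), one iteration per set bit: idiomatic bit counting.
-- Both Pythons diverge when x ^ y < 0 (Pre_ excludes that); the loop guards below use
-- 0 < xor instead of xor ≠ 0 only to make the ports total — identical behaviour on Pre_.

-- ===== PORT A =====
-- while xor: if xor & 1: distance += 1; xor >>= 1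
def hdLoopA (xor : Int) (distance : Int) : Int :=
  if h : 0 < xor then
    hdLoopA (xor >>> (1:Nat))
      (if PySem.Int.band xor 1 ≠ 0 then distance + 1 else distance)
  else distance
termination_by xor.toNat
decreasing_by
  have : xor >>> (1:Nat) = xor / 2 := by simp [Int.shiftRight_eq_div_pow]
  rw [this]; omega

def hammingDistance (x : Int) (y : Int) : Int :=
  hdLoopA (PySem.Int.bxor x y) 0

-- ===== PORT B =====
-- while xor: xor &= xor - 1; distance += 1
def hdLoopB (xor : Int) (distance : Int) : Int :=
  if h : 0 < xor then
    hdLoopB (PySem.Int.band xor (xor - 1)) (distance + 1)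
  else distance
termination_by xor.toNat
decreasing_by
  have h0 : (0:Int) ≤ xor := le_of_lt h
  have h1 : (0:Int) ≤ xor - 1 := by omega
  have := PySem.Int.band_of_nonneg h0 h1
  rw [this]
  have hle : xor.toNat &&& (xor - 1).toNat ≤ (xor - 1).toNat := Nat.and_le_right
  omega

def hammingDistance_alt (x : Int) (y : Int) : Int :=
  hdLoopB (PySem.Int.bxor x y) 0

-- ===== PRECONDITION & SPEC =====
-- Pre_ excludes x ^ y < 0: there Python A's while-loop never terminates (xor >> 1 stalls at -1).
def Pre_hammingDistance (x : Int) (y : Int) : Prop := 0 ≤ PySem.Int.bxor x y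
instance (x : Int) (y : Int) : Decidable (Pre_hammingDistance x y) := by
  unfold Pre_hammingDistance; infer_instance
def pvWitness_hammingDistance : Int × Int := (3, 5)

def Spec_hammingDistance (x : Int) (y : Int) (out : Int) : Prop := out = hammingDistance_alt x y
instance (x : Int) (y : Int) (out : Int) : Decidable (Spec_hammingDistance x y out) := by
  unfold Spec_hammingDistance; infer_instance

-- ===== CLAIM (what is proved, stated in full; the proofs are below) =====
def Claim_equal_hammingDistance : Prop := ∀ (x : Int) (y : Int), Dom_hammingDistance x y → Pre_hammingDistance x y → Spec_hammingDistance x y (hammingDistance x y)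

-- ===== LEMMAS AND PROOFS =====

-- parity of a Nat AND
lemma and_mod_two (m n : Nat) : (m &&& n) % 2 = m % 2 &&& n % 2 := by
  have h := Nat.testBit_and m n 0
  simp only [Nat.testBit_zero] at h
  rcases Nat.mod_two_eq_zero_or_one m with hm | hm <;> rcases Nat.mod_two_eq_zero_or_one n with hn | hn <;>
    rcases Nat.mod_two_eq_zero_or_one (m &&& n) with ha | ha <;>
    simp [hm, hn, ha] at h ⊢

-- clearing the lowest set bit drops the popcount by exactly one
lemma bitCount_clear (m : Nat) (h : 0 < m) :
    PySem.Int.bitCount ((m &&& (m - 1) : Nat) : Int) + 1 = PySem.Int.bitCount (m : Int) := by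
  induction m using Nat.strong_induction_on with
  | _ m ih =>
    rcases Nat.even_or_odd m with he | ho
    · -- m even: m &&& (m-1) = 2 * (k &&& (k-1)) with k = m/2
      obtain ⟨k, hk⟩ := he
      have hk2 : m = 2 * k := by omega
      have hkpos : 0 < k := by omega
      have hdiv : (m &&& (m - 1)) / 2 = k &&& (k - 1) := by
        rw [Nat.and_div_two]
        congr 1 <;> omega
      have hmod : (m &&& (m - 1)) % 2 = 0 := by
        rw [and_mod_two]
        have : m % 2 = 0 := by omega
        simp [this]
      have hval : m &&& (m - 1) = 2 * (k &&& (k - 1)) := by omega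
      rw [hval]
      have hbc2 : ∀ j : Nat, PySem.Int.bitCount ((2 * j : Nat) : Int) = PySem.Int.bitCount (j : Int) := by
        intro j
        rcases Nat.eq_zero_or_pos j with hj | hj
        · simp [hj]
        · rw [PySem.Int.bitCount_natCast (m := 2 * j) (by omega)]
          have : 2 * j % 2 = 0 := by omega
          have h2 : 2 * j / 2 = j := by omega
          rw [this, h2]
          omega
      rw [hbc2, ih k (by omega) hkpos, hk2, hbc2]
    · -- m odd: m &&& (m-1) = m - 1
      have hmo : m % 2 = 1 := Nat.odd_iff.mp ho
      have hdiv : (m &&& (m - 1)) / 2 = m / 2 := by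
        rw [Nat.and_div_two]
        have : (m - 1) / 2 = m / 2 := by omega
        rw [this, Nat.and_self]
      have hmod : (m &&& (m - 1)) % 2 = 0 := by
        rw [and_mod_two, hmo]
        have : (m - 1) % 2 = 0 := by omega
        simp [this]
      have hval : m &&& (m - 1) = 2 * (m / 2) := by omega
      rw [hval, PySem.Int.bitCount_natCast (m := m) h, hmo]
      rcases Nat.eq_zero_or_pos (m / 2) with hz | hp
      · simp [hz]
      · rw [PySem.Int.bitCount_natCast (m := 2 * (m / 2)) (by omega)]
        have h0 : 2 * (m / 2) % 2 = 0 := by omega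
        have h2 : 2 * (m / 2) / 2 = m / 2 := by omega
        rw [h0, h2]
        omega

lemma hdLoopA_eq (m : Nat) (d : Int) :
    hdLoopA (m : Int) d = d + PySem.Int.bitCount (m : Int) := by
  induction m using Nat.strong_induction_on generalizing d with
  | _ m ih =>
    rcases Nat.eq_zero_or_pos m with hz | hp
    · subst hz
      rw [hdLoopA]
      simp
    · rw [hdLoopA]
      have hpos : (0:Int) < (m : Int) := by exact_mod_cast hp
      rw [dif_pos hpos]
      have hshift : ((m : Int)) >>> (1:Nat) = ((m / 2 : Nat) : Int) := by
        have : ((m:Int)) >>> (1:Nat) = (m:Int) / 2 := by simp [Int.shiftRight_eq_div_pow]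
        rw [this]; omega
      have hband : PySem.Int.band (m:Int) 1 = ((m &&& 1 : Nat) : Int) := by
        have := PySem.Int.band_natCast m 1; simpa using this
      rw [hshift, hband, ih (m / 2) (by omega)]
      rw [PySem.Int.bitCount_natCast (m := m) hp]
      rw [Nat.and_one_is_mod]
      rcases Nat.mod_two_eq_zero_or_one m with h2 | h2
      · simp [h2]
      · simp [h2]
        ring

lemma hdLoopB_eq (m : Nat) (d : Int) :
    hdLoopB (m : Int) d = d + PySem.Int.bitCount (m : Int) := by
  induction m using Nat.strong_induction_on generalizing d with
  | _ m ih =>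
    rcases Nat.eq_zero_or_pos m with hz | hp
    · subst hz
      rw [hdLoopB]
      simp
    · rw [hdLoopB]
      have hpos : (0:Int) < (m : Int) := by exact_mod_cast hp
      rw [dif_pos hpos]
      have hband : PySem.Int.band (m:Int) ((m:Int) - 1) = ((m &&& (m - 1) : Nat) : Int) := by
        have h1 : ((m:Int) - 1) = ((m - 1 : Nat) : Int) := by omega
        rw [h1]
        exact PySem.Int.band_natCast m (m - 1)
      have hlt : m &&& (m - 1) < m := by
        have : m &&& (m - 1) ≤ m - 1 := Nat.and_le_right
        omega
      rw [hband, ih (m &&& (m - 1)) hlt]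
      have := bitCount_clear m hp
      omega

theorem pvWitness_ok : Dom_hammingDistance pvWitness_hammingDistance.1 pvWitness_hammingDistance.2 ∧
    Pre_hammingDistance pvWitness_hammingDistance.1 pvWitness_hammingDistance.2 := by decide

-- ===== VERDICT (by name: the statement is the Claim_ definition above) =====
theorem hammingDistance_spec : Claim_equal_hammingDistance := by
  intro x y _ hpre
  unfold Spec_hammingDistance hammingDistance hammingDistance_alt
  set z := PySem.Int.bxor x y with hz
  have h0 : (0:Int) ≤ z := hpre
  have hzz : z = ((z.toNat : Nat) : Int) := by omega
  rw [hzz, hdLoopA_eq, hdLoopB_eq]
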